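-- pv_equiv track=rewrite | github.com/mwcue/veneer-lead-agent-v1 | tools/unified_email_finder.py | get_best_email
-- ===== SOURCE A (Python) =====
-- def get_best_email(emails):
--     """Select the best email from a list based on common business prefixes."""
--     if not emails:
--         return None
--
--     # Priority prefixes for business emails
--     prefixes = [
--         'contact@', 'info@', 'hello@', 'sales@', 'support@',
--         'team@', 'hr@', 'careers@', 'jobs@', 'inquiries@'
--     ]
--
--     # First try to find emails with priority prefixes
--     for prefix in prefixes:
--         for email in emails:
--             if email.startswith(prefix):
--                 return email
--
--     # If no priority email found, return the first one
--     return emails[0]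
-- ===== SOURCE B (Python) =====
-- def get_best_email(emails):
--     """Select the best email from a list based on common business prefixes."""
--     prefixes = [
--         'contact@', 'info@', 'hello@', 'sales@', 'support@',
--         'team@', 'hr@', 'careers@', 'jobs@', 'inquiries@'
--     ]
--     sentinel = len(prefixes)
--     best = None
--     best_rank = sentinel
--     for email in emails:
--         rank = next((i for i, p in enumerate(prefixes) if email.startswith(p)), sentinel)
--         if rank < best_rank:
--             best = email
--             best_rank = rank
--     if best is not None:
--         return best
--     return emails[0] if emails else None
-- ===== Notes on version B (the rewrite author's own statement) =====
-- stated objective: alternative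
-- what changed: Replaces A's prefix-outer nested loops (up to 10 scans of the email list) with a single pass over emails that tracks the best-ranked email so far, ranking each email by the index of the first prefix it starts with.
import Mathlib
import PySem

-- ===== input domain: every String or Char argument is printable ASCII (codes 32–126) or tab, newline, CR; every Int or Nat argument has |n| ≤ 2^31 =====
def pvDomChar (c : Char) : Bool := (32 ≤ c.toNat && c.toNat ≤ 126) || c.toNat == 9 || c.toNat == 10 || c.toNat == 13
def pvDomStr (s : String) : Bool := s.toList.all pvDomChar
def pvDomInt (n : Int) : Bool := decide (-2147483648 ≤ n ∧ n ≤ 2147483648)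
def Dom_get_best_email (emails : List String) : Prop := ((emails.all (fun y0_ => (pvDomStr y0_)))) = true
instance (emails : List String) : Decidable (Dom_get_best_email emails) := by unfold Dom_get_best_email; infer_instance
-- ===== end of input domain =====

-- B replaces A's prefix-outer nested loops with a single pass over the emails
-- tracking the best-ranked email so far (alternative structure, same cost).

-- ===== PORT A =====
-- the shared constant list of priority prefixes
def pvPrefixes : List String :=
  ["contact@", "info@", "hello@", "sales@", "support@",
   "team@", "hr@", "careers@", "jobs@", "inquiries@"]

-- A's inner loop: first email starting with the given prefix
def pvFindEmail (p : String) : List String → Option String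
  | [] => none
  | e :: t => if PySem.Str.startswith e p then some e else pvFindEmail p t

-- A's outer loop over the prefixes, returning at the first hit
def pvALoop (es : List String) : List String → Option String
  | [] => none
  | p :: t =>
    match pvFindEmail p es with
    | some e => some e
    | none => pvALoop es t

def get_best_email (emails : List String) : Option String :=
  if emails = [] then none
  else
    match pvALoop emails pvPrefixes with
    | some e => some e
    | none => PySem.List.pyGet? emails 0   -- emails[0], list known nonempty

-- ===== PORT B =====
-- rank of an email: index of the first prefix it starts with (length = sentinel if none)
def pvRankOf (email : String) : Nat :=
  List.findIdx (fun p => PySem.Str.startswith email p) pvPrefixes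

-- B's single loop over the emails, keeping the best (strictly smaller rank wins)
def pvBLoop : List String → Option String → Nat → Option String
  | [], best, _ => best
  | e :: t, best, bestRank =>
    if pvRankOf e < bestRank then pvBLoop t (some e) (pvRankOf e)
    else pvBLoop t best bestRank

def get_best_email_alt (emails : List String) : Option String :=
  match pvBLoop emails none pvPrefixes.length with
  | some b => some b
  | none => if emails = [] then none else PySem.List.pyGet? emails 0

-- ===== PRECONDITION & SPEC =====
def Spec_get_best_email (emails : List String) (out : Option String) : Prop := out = get_best_email_alt emails
instance (emails : List String) (out : Option String) : Decidable (Spec_get_best_email emails out) := by unfold Spec_get_best_email; infer_instance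

-- ===== CLAIM (what is proved, stated in full; the proofs are below) =====
def Claim_equal_get_best_email : Prop := ∀ (emails : List String), Dom_get_best_email emails → Spec_get_best_email emails (get_best_email emails)

-- ===== LEMMAS AND PROOFS =====

-- B's loop generalized over the rank function (proof device)
def pvGenLoop (rk : String → Nat) : List String → Option String → Nat → Option String
  | [], best, _ => best
  | e :: t, best, bestRank =>
    if rk e < bestRank then pvGenLoop rk t (some e) (rk e)
    else pvGenLoop rk t best bestRank

theorem pvBLoop_eq_gen (es : List String) (b : Option String) (r : Nat) :
    pvBLoop es b r = pvGenLoop pvRankOf es b r := by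
  induction es generalizing b r with
  | nil => rfl
  | cons e t ih => simp [pvBLoop, pvGenLoop, ih]

theorem pvGen_congr (rk1 rk2 : String → Nat) (es : List String)
    (h : ∀ e ∈ es, rk1 e = rk2 e) (b : Option String) (r : Nat) :
    pvGenLoop rk1 es b r = pvGenLoop rk2 es b r := by
  induction es generalizing b r with
  | nil => rfl
  | cons e t ih =>
    have he := h e (List.mem_cons_self)
    simp only [pvGenLoop, he]
    split <;> exact ih (fun x hx => h x (List.mem_cons_of_mem _ hx)) _ _

theorem pvGen_shift (rk : String → Nat) (es : List String) (b : Option String) (r : Nat) :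
    pvGenLoop (fun e => rk e + 1) es b (r + 1) = pvGenLoop rk es b r := by
  induction es generalizing b r with
  | nil => rfl
  | cons e t ih =>
    simp only [pvGenLoop, Nat.add_lt_add_iff_right]
    split <;> exact ih _ _

theorem pvGen_zero (rk : String → Nat) (es : List String) (b : Option String) :
    pvGenLoop rk es b 0 = b := by
  induction es with
  | nil => rfl
  | cons e t ih => simp [pvGenLoop, ih]

theorem pvGen_found (p : String) (rk : String → Nat)
    (hrk : ∀ e, rk e = 0 ↔ PySem.Str.startswith e p = true) :
    ∀ (es : List String) (e0 : String) (b : Option String) (r : Nat), 1 ≤ r →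
    pvFindEmail p es = some e0 → pvGenLoop rk es b r = some e0 := by
  intro es
  induction es with
  | nil => intro e0 b r _ h; simp [pvFindEmail] at h
  | cons e t ih =>
    intro e0 b r hr h
    by_cases hs : PySem.Str.startswith e p = true
    · have h0 : rk e = 0 := (hrk e).mpr hs
      have hs' := hs; simp only [PySem.Str.startswith] at hs'
      have he0 : e = e0 := by simpa [pvFindEmail, hs'] using h
      subst he0
      simp [pvGenLoop, h0, Nat.lt_of_lt_of_le Nat.zero_lt_one hr, pvGen_zero]
    · have hs' := hs; simp only [PySem.Str.startswith] at hs'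
      have h' : pvFindEmail p t = some e0 := by simpa [pvFindEmail, hs'] using h
      have hne : rk e ≠ 0 := fun hc => hs ((hrk e).mp hc)
      simp only [pvGenLoop]
      split
      · exact ih e0 (some e) (rk e) (Nat.one_le_iff_ne_zero.mpr hne) h'
      · exact ih e0 b r hr h'

theorem pvFindEmail_none (p : String) (es : List String)
    (h : pvFindEmail p es = none) : ∀ e ∈ es, ¬ PySem.Str.startswith e p = true := by
  induction es with
  | nil => simp
  | cons e t ih =>
    by_cases hs : PySem.Str.startswith e p = true
    · have hs' := hs; simp only [PySem.Str.startswith] at hs'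
      simp [pvFindEmail, hs'] at h
    · intro x hx
      rcases List.mem_cons.mp hx with rfl | hx'
      · exact hs
      · have hs' := hs; simp only [PySem.Str.startswith] at hs'
        exact ih (by simpa [pvFindEmail, hs'] using h) x hx'

-- main lemma: A's nested loops over a prefix list = B's single pass with ranks over that list
theorem pvMain (ps es : List String) :
    pvALoop es ps
      = pvGenLoop (fun e => List.findIdx (fun p => PySem.Str.startswith e p) ps) es none ps.length := by
  induction ps with
  | nil => simp [pvALoop, pvGen_zero]
  | cons p t ih =>
    simp only [pvALoop]
    cases hf : pvFindEmail p es with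
    | some e0 =>
      refine (pvGen_found p _ (fun e => ?_) es e0 none (p :: t).length (by simp) hf).symm
      constructor
      · intro h
        by_cases hs : PySem.Str.startswith e p = true
        · exact hs
        · have hs' := hs; simp only [PySem.Str.startswith] at hs'
          simp [List.findIdx_cons, hs'] at h
      · intro hs
        have hs' := hs; simp only [PySem.Str.startswith] at hs'
        simp [List.findIdx_cons, hs']
    | none =>
      have hall := pvFindEmail_none p es hf
      rw [ih]
      have hcg : pvGenLoop (fun e => List.findIdx (fun q => PySem.Str.startswith e q) (p :: t)) es none (p :: t).length
          = pvGenLoop (fun e => List.findIdx (fun q => PySem.Str.startswith e q) t + 1) es none (t.length + 1) := by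
        refine pvGen_congr _ _ es (fun e he => ?_) _ _
        have hs : PySem.Chars.startswith e.toList p.toList = false := by
          have := hall e he; simpa [PySem.Str.startswith] using this
        simp [List.findIdx_cons, hs]
      rw [hcg, pvGen_shift]

-- ===== VERDICT (by name: the statement is the Claim_ definition above) =====
theorem get_best_email_spec : Claim_equal_get_best_email := by
  intro emails _
  unfold Spec_get_best_email get_best_email get_best_email_alt
  rw [pvBLoop_eq_gen]
  have hr : pvGenLoop pvRankOf emails none pvPrefixes.length
      = pvGenLoop (fun e => List.findIdx (fun p => PySem.Str.startswith e p) pvPrefixes)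
          emails none pvPrefixes.length := by
    exact pvGen_congr _ _ emails (fun e _ => rfl) _ _
  rw [hr, ← pvMain]
  by_cases h : emails = []
  · subst h; rfl
  · simp [h]
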